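-- pv_equiv track=rewrite | github.com/AWConant/hackerrank | competitions/weekofcode33/path_matching.py | cache_log_values
-- ===== SOURCE A (Python) =====
-- LEVEL = 18
--
-- def cache_log_values(n, MAXN):
--     P2 = [1]
--     for i in range(1, LEVEL):
--         P2.append( P2[i-1]*2 )
--
--     LOG2N = [None]
--     val, idx = 1, 0
--     for i in range(1, (MAXN*2)+1):
--         if val != i:
--             LOG2N.append(idx-1)
--         else:
--             val *= 2
--             LOG2N.append(idx)
--             idx += 1
--
--     return P2, LOG2N
-- ===== SOURCE B (Python) =====
-- LEVEL = 18
--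
-- def cache_log_values(n, MAXN):
--     # DP: floor(log2 i) = floor(log2 (i >> 1)) + 1, instead of A's running (val, idx) counter machine.
--     P2 = [2**i for i in range(LEVEL)]
--     top = 2 * MAXN
--     LOG2N = [None]
--     if top >= 1:
--         LOG2N.append(0)
--     for i in range(2, top + 1):
--         LOG2N.append(LOG2N[i >> 1] + 1)
--     return P2, LOG2N
-- ===== Notes on version B (the rewrite author's own statement) =====
-- stated objective: alternative
-- what changed: LOG2N is built by the DP recurrence floor(log2 i) = LOG2N[i >> 1] + 1 looked up in the table under construction, and P2 by a direct comprehension of powers, instead of A's running (val, idx) next-power-of-two counter machine.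
import Mathlib
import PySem

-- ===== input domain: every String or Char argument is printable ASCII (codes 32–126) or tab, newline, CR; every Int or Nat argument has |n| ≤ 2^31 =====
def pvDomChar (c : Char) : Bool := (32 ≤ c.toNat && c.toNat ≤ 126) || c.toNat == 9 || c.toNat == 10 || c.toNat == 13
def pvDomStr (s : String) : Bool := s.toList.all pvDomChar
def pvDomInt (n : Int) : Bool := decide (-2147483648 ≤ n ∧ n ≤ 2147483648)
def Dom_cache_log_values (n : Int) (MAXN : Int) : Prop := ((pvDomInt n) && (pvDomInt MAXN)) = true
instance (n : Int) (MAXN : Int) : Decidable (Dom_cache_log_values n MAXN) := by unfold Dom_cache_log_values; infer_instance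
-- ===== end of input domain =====

-- B replaces A's running (val, idx) power-of-two counter machine by the DP recurrence
-- floor(log2 i) = floor(log2 (i >> 1)) + 1 looked up in the table being built (objective: alternative).

-- ===== PORT A =====
-- loop body of A's LOG2N loop: state (LOG2N, val, idx)
def pvStepA (st : List (Option Int) × Int × Int) (i : Int) : List (Option Int) × Int × Int :=
  if st.2.1 ≠ i then (st.1 ++ [some (st.2.2 - 1)], st.2.1, st.2.2)
  else (st.1 ++ [some st.2.2], st.2.1 * 2, st.2.2 + 1)

def cache_log_values (n : Int) (MAXN : Int) : List Int × List (Option Int) :=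
  -- P2 loop: P2[i-1] is always in range, so pyGetD's default 0 is never used
  let P2 := (PySem.List.pyRange 1 18 1).foldl
    (fun P2 i => P2 ++ [PySem.List.pyGetD P2 (i - 1) 0 * 2]) [1]
  let st := (PySem.List.pyRange 1 (MAXN * 2 + 1) 1).foldl pvStepA ([none], 1, 0)
  (P2, st.1)

-- ===== PORT B =====
-- loop body of B's LOG2N loop: LOG2N[i >> 1] is always in range and always `some`
-- (index i >> 1 ≥ 1), so the defaults `none` / `0` are never used
def pvStepB (L : List (Option Int)) (i : Int) : List (Option Int) :=
  L ++ [some ((PySem.List.pyGetD L (i >>> (1 : Nat)) none).getD 0 + 1)]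

def cache_log_values_alt (n : Int) (MAXN : Int) : List Int × List (Option Int) :=
  let P2 := (PySem.List.pyRange 0 18 1).map (fun i => (2 : Int) ^ i.toNat)
  let top := 2 * MAXN
  let init : List (Option Int) := if top ≥ 1 then [none, some 0] else [none]
  let LOG2N := (PySem.List.pyRange 2 (top + 1) 1).foldl pvStepB init
  (P2, LOG2N)

-- ===== PRECONDITION & SPEC =====
def Spec_cache_log_values (n : Int) (MAXN : Int) (out : List Int × List (Option Int)) : Prop := out = cache_log_values_alt n MAXN
instance (n : Int) (MAXN : Int) (out : List Int × List (Option Int)) : Decidable (Spec_cache_log_values n MAXN out) := by unfold Spec_cache_log_values; infer_instance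

-- ===== CLAIM (what is proved, stated in full; the proofs are below) =====
def Claim_equal_cache_log_values : Prop := ∀ (n : Int) (MAXN : Int), Dom_cache_log_values n MAXN → Spec_cache_log_values n MAXN (cache_log_values n MAXN)

-- ===== LEMMAS AND PROOFS =====

-- the common LOG2N table for a loop bound m: index 0 is None, index k ≥ 1 holds floor(log2 k)
def pvTable (m : Nat) : List (Option Int) :=
  none :: (List.range' 1 m).map (fun k => some ((Nat.log2 k : Int)))

-- A's idx after processing 1..m
def pvIdx (m : Nat) : Nat := if m = 0 then 0 else Nat.log2 m + 1

lemma pv_log2_eq (m k : Nat) (h1 : 2 ^ k ≤ m) (h2 : m < 2 ^ (k + 1)) : Nat.log2 m = k := by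
  rw [Nat.log2_eq_log_two]; exact Nat.log_eq_of_pow_le_of_lt_pow h1 h2

lemma pv_log2_succ (m : Nat) (h : 2 ≤ m) : Nat.log2 m = Nat.log2 (m / 2) + 1 := by
  have h0 : m / 2 ≠ 0 := by omega
  have h1 : 2 ^ Nat.log2 (m / 2) ≤ m / 2 := Nat.log2_self_le h0
  have h2 : m / 2 < 2 ^ (Nat.log2 (m / 2) + 1) := Nat.lt_log2_self
  have e1 : 2 ^ (Nat.log2 (m / 2) + 1) = 2 * 2 ^ Nat.log2 (m / 2) := by ring
  have e2 : 2 ^ (Nat.log2 (m / 2) + 1 + 1) = 2 * 2 ^ (Nat.log2 (m / 2) + 1) := by ring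
  exact pv_log2_eq m (Nat.log2 (m / 2) + 1) (by omega) (by omega)

lemma pv_table_succ (m : Nat) :
    pvTable (m + 1) = pvTable m ++ [some ((Nat.log2 (m + 1) : Int))] := by
  simp [pvTable, List.range'_concat, Nat.add_comm 1 m]

lemma pvA_loop (m : Nat) :
    (PySem.List.pyRange 1 ((m : Int) + 1) 1).foldl pvStepA ([none], 1, 0) =
      (pvTable m, (2 : Int) ^ pvIdx m, (pvIdx m : Int)) := by
  induction m with
  | zero => simp [pvTable, pvIdx]
  | succ m ih =>
    have hr : PySem.List.pyRange 1 ((m : Int) + 1 + 1) 1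
        = PySem.List.pyRange 1 ((m : Int) + 1) 1 ++ [(m : Int) + 1] :=
      PySem.List.pyRange_one_succ_right (by omega)
    rw [show ((m + 1 : Nat) : Int) + 1 = (m : Int) + 1 + 1 by push_cast; ring, hr,
        List.foldl_append, ih, List.foldl_cons, List.foldl_nil]
    have hlt : m < 2 ^ pvIdx m := by
      by_cases hm : m = 0
      · simp [hm, pvIdx]
      · simpa [pvIdx, hm] using Nat.lt_log2_self (n := m)
    simp only [pvStepA]
    by_cases hpow : (m + 1 : Nat) = 2 ^ pvIdx m
    · -- i == val: m+1 is the next power of two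
      have hval : (2 : Int) ^ pvIdx m = (m : Int) + 1 := by exact_mod_cast hpow.symm
      have hlog : Nat.log2 (m + 1) = pvIdx m := by rw [hpow, Nat.log2_two_pow]
      have hidx : pvIdx (m + 1) = pvIdx m + 1 := by simp [pvIdx, hlog]
      rw [if_neg (by simp [hval])]
      rw [pv_table_succ, hlog, hidx]
      exact Prod.ext rfl (Prod.ext (by ring) (by push_cast; ring))
    · -- i != val
      have hval : (2 : Int) ^ pvIdx m ≠ (m : Int) + 1 := by
        intro hc; exact hpow (by exact_mod_cast hc.symm)
      have hlt1 : m + 1 < 2 ^ pvIdx m := by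
        rcases Nat.lt_or_ge (m + 1) (2 ^ pvIdx m) with h | h
        · exact h
        · omega
      have hm0 : ¬ (m = 0) := by
        intro hc; subst hc; simp [pvIdx] at hlt1
      have hlog : Nat.log2 (m + 1) = Nat.log2 m := by
        apply pv_log2_eq
        · exact le_trans (Nat.log2_self_le hm0) (by omega)
        · simpa [pvIdx, hm0] using hlt1
      have hidx : pvIdx (m + 1) = pvIdx m := by simp [pvIdx, hlog, hm0]
      rw [if_pos hval]
      rw [pv_table_succ, hlog, hidx]
      have hcomp : ((pvIdx m : Int)) - 1 = ((Nat.log2 m : Nat) : Int) := by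
        simp [pvIdx, hm0]
      rw [hcomp]

lemma pvB_loop (m : Nat) (hm : 1 ≤ m) :
    (PySem.List.pyRange 2 ((m : Int) + 1) 1).foldl pvStepB [none, some 0] = pvTable m := by
  induction m with
  | zero => omega
  | succ m ih =>
    by_cases hm0 : m = 0
    · subst hm0
      decide
    · have hm1 : 1 ≤ m := by omega
      have hr : PySem.List.pyRange 2 ((m : Int) + 1 + 1) 1
          = PySem.List.pyRange 2 ((m : Int) + 1) 1 ++ [(m : Int) + 1] :=
        PySem.List.pyRange_one_succ_right (by omega)
      rw [show ((m + 1 : Nat) : Int) + 1 = (m : Int) + 1 + 1 by push_cast; ring, hr,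
          List.foldl_append, ih hm1, List.foldl_cons, List.foldl_nil]
      -- step at i = m+1 ≥ 2
      simp only [pvStepB]
      have hsh : ((m : Int) + 1) >>> (1 : Nat) = (((m + 1) / 2 : Nat) : Int) := by
        rw [show (m : Int) + 1 = ((m + 1 : Nat) : Int) by push_cast; ring]
        exact Int.mem_toNat?.mp rfl
      set k : Nat := (m + 1) / 2 with hk
      have hk1 : 1 ≤ k := by omega
      have hkm : k ≤ m := by omega
      have hget : PySem.List.pyGetD (pvTable m) ((k : Nat) : Int) none
          = some ((Nat.log2 k : Int)) := by
        rw [PySem.List.pyGetD_natCast]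
        unfold pvTable
        rw [List.getD_eq_getElem?_getD]
        obtain ⟨j, hj⟩ : ∃ j, k = j + 1 := ⟨k - 1, by omega⟩
        have hjm : j < m := by omega
        rw [hj]
        simp [hjm]
        rw [Nat.add_comm]
      have hlog : Nat.log2 (m + 1) = Nat.log2 k + 1 := pv_log2_succ (m + 1) (by omega)
      rw [hsh, hget, pv_table_succ, hlog]
      simp only [Option.getD_some]
      push_cast
      ring_nf

-- the two P2 tables are closed terms; the kernel evaluates both
lemma pv_P2_eq :
    (PySem.List.pyRange 1 18 1).foldl
      (fun P2 i => P2 ++ [PySem.List.pyGetD P2 (i - 1) 0 * 2]) [1]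
    = (PySem.List.pyRange 0 18 1).map (fun i => (2 : Int) ^ i.toNat) := by
  decide

lemma pv_main (n MAXN : Int) : cache_log_values n MAXN = cache_log_values_alt n MAXN := by
  unfold cache_log_values cache_log_values_alt
  rw [pv_P2_eq]
  refine congrArg _ ?_
  by_cases hN : 2 * MAXN ≥ 1
  · have hm : (2 * MAXN).toNat ≥ 1 := by omega
    have hcast : ((2 * MAXN).toNat : Int) = 2 * MAXN := by omega
    have hA := pvA_loop (2 * MAXN).toNat
    have hB := pvB_loop (2 * MAXN).toNat hm
    rw [hcast] at hA hB
    rw [if_pos hN]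
    rw [show MAXN * 2 + 1 = 2 * MAXN + 1 by ring, hA, hB]
  · have hA : PySem.List.pyRange 1 (MAXN * 2 + 1) 1 = [] :=
      PySem.List.pyRange_one_eq_nil (by omega)
    have hB : PySem.List.pyRange 2 (2 * MAXN + 1) 1 = [] :=
      PySem.List.pyRange_one_eq_nil (by omega)
    rw [if_neg hN, hA, hB]
    rfl

-- ===== VERDICT (by name: the statement is the Claim_ definition above) =====
theorem cache_log_values_spec : Claim_equal_cache_log_values := by
  intro n MAXN _
  unfold Spec_cache_log_values
  exact pv_main n MAXN
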